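-- pv_equiv track=rewrite | github.com/Lakshya-Kejriwal/Lizard-problem | homework.py | checkWithTrees
-- ===== SOURCE A (Python) =====
-- def checkWithTrees(values, count):
--     index = [index for index, j in enumerate(values) if j==2]
--     if count > len(index)+1:
--         return True
--     index.append(len(values)-1)
--     index.insert(0, 0)
--     for idx in range(len(index)-1):
--         if(values[index[idx]:index[idx+1]+1].count(1) > 1):
--             return True
-- ===== SOURCE B (Python) =====
-- def checkWithTrees(values, count):
--     # One linear scan: trees = number of 2s seen, ones = number of 1s since the last 2.
--     trees = 0
--     ones = 0
--     for v in values: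
--         if v == 2:
--             trees += 1
--             ones = 0
--         elif v == 1:
--             ones += 1
--             if ones == 2:
--                 return True
--     if count > trees + 1:
--         return True
-- ===== Notes on version B (the rewrite author's own statement) =====
-- stated objective: simpler
-- what changed: Replaces the build-index-of-2s-then-slice-and-count two-phase approach with a single linear scan keeping two running counters (number of 2s, number of 1s since the last 2), returning True as soon as a second 1 appears in a segment.
import Mathlib
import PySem

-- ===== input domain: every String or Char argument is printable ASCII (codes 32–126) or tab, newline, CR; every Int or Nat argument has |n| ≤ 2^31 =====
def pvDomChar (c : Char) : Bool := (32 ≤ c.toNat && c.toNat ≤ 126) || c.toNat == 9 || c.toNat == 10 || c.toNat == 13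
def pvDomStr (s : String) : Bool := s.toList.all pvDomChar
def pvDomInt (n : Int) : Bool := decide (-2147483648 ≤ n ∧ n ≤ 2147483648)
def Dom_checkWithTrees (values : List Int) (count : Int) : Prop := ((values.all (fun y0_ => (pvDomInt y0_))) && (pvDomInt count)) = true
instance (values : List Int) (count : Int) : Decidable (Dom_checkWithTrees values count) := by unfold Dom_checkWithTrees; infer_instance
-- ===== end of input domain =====

-- B replaces A's build-index-of-2s / slice-and-count-per-segment two-phase scheme with a
-- single linear scan over the values keeping two running counters (objective: simpler).


-- ===== PORT A =====
-- 'for idx in range(len(index)-1)' reads index[idx] and index[idx+1]: ported as structural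
-- recursion over the adjacent pairs of the index list (falling off the loop returns None).
def checkWithTreesLoop (values : List Int) : List Int → Option Bool
  | a :: b :: rest =>
    if (PySem.List.slice values (some a) (some (b + 1))).count 1 > 1 then some true
    else checkWithTreesLoop values (b :: rest)
  | _ => none

def checkWithTrees (values : List Int) (count : Int) : Option Bool :=
  -- index = [index for index, j in enumerate(values) if j==2]
  let index : List Int :=
    (PySem.List.enumerate values 0).filterMap (fun p => if p.2 == 2 then some p.1 else none)
  if count > (index.length : Int) + 1 then some true
  else
    -- index.append(len(values)-1); index.insert(0, 0)
    checkWithTreesLoop values (PySem.List.insert (index ++ [(values.length : Int) - 1]) 0 0)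

-- ===== PORT B =====
-- the scan: returns none on the early 'return True', otherwise the final trees counter
def checkWithTreesAltScan : List Int → Int → Int → Option Int
  | [], trees, _ => some trees
  | v :: rest, trees, ones =>
    if v == 2 then checkWithTreesAltScan rest (trees + 1) 0
    else if v == 1 then
      if ones + 1 == 2 then none else checkWithTreesAltScan rest trees (ones + 1)
    else checkWithTreesAltScan rest trees ones

def checkWithTrees_alt (values : List Int) (count : Int) : Option Bool :=
  match checkWithTreesAltScan values 0 0 with
  | none => some true
  | some trees => if count > trees + 1 then some true else none

-- ===== PRECONDITION & SPEC =====
def Spec_checkWithTrees (values : List Int) (count : Int) (out : Option Bool) : Prop := out = checkWithTrees_alt values count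
instance (values : List Int) (count : Int) (out : Option Bool) : Decidable (Spec_checkWithTrees values count out) := by unfold Spec_checkWithTrees; infer_instance

-- ===== CLAIM (what is proved, stated in full; the proofs are below) =====
def Claim_equal_checkWithTrees : Prop := ∀ (values : List Int) (count : Int), Dom_checkWithTrees values count → Spec_checkWithTrees values count (checkWithTrees values count)

-- ===== LEMMAS AND PROOFS =====

-- badFrom vs o: pure-Boolean companion of B's scan — true iff the scan hits an early 'return True'
def badFrom : List Int → Int → Bool
  | [], _ => false
  | v :: rest, o =>
    if v == 2 then badFrom rest 0
    else if v == 1 then ((o + 1 == 2) || badFrom rest (o + 1))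
    else badFrom rest o

lemma scan_eq (vs : List Int) : ∀ (t o : Int),
    checkWithTreesAltScan vs t o = if badFrom vs o then none else some (t + (vs.count 2 : Int)) := by
  induction vs with
  | nil => intro t o; simp [checkWithTreesAltScan, badFrom]
  | cons v rest ih =>
    intro t o
    simp only [checkWithTreesAltScan, badFrom, List.count_cons]
    by_cases h2 : v == 2
    · simp only [h2, if_true, ih]
      split_ifs <;> simp [add_assoc, add_comm]
    · by_cases h1 : v == 1
      · simp only [h2, h1, if_true, ih]
        by_cases ho : (o + 1 == 2) = true
        · simp [ho]
        · simp only [ho, Bool.false_or]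
          split_ifs <;> simp_all
      · simp only [h2, h1, ih]
        simp_all

lemma badFrom_no2 (vs : List Int) : ∀ (o : Int), (∀ x ∈ vs, x ≠ 2) → 0 ≤ o → o ≤ 1 →
    badFrom vs o = decide (2 ≤ o + (vs.count 1 : Int)) := by
  induction vs with
  | nil => intro o _ h0 h1; simp [badFrom]; omega
  | cons v rest ih =>
    intro o hfree h0 h1
    have hv2 : (v == 2) = false := by
      simpa using hfree v (by simp)
    simp only [badFrom, hv2, List.count_cons]
    by_cases h1v : v == 1
    · simp only [h1v, if_true]
      by_cases ho : o = 1
      · subst ho; simp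
        omega
      · have ho0 : o = 0 := by omega
        subst ho0
        simp only [show ((0:Int) + 1 == 2) = false by decide, Bool.false_or]
        norm_num
        rw [ih 1 (fun x hx => hfree x (by simp [hx])) (by omega) (by omega)]
        simp; constructor <;> intro <;> omega
    · simp only [h1v]
      rw [ih o (fun x hx => hfree x (by simp [hx])) h0 h1]
      simp
lemma badFrom_split (pre : List Int) : ∀ (rest : List Int) (o : Int), (∀ x ∈ pre, x ≠ 2) → 0 ≤ o → o ≤ 1 →
    badFrom (pre ++ 2 :: rest) o = (decide (2 ≤ o + (pre.count 1 : Int)) || badFrom rest 0) := by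
  induction pre with
  | nil => intro rest o _ h0 h1; simp [badFrom]; omega
  | cons v pre ih =>
    intro rest o hfree h0 h1
    have hv2 : (v == 2) = false := by simpa using hfree v (by simp)
    simp only [List.cons_append, badFrom, hv2, List.count_cons]
    by_cases h1v : v == 1
    · simp only [h1v, if_true]
      by_cases ho : o = 1
      · subst ho
        simp only [show ((1:Int) + 1 == 2) = true by decide, Bool.true_or]
        have : decide (2 ≤ (1:Int) + ((pre.count 1 + 1 : Nat) : Int)) = true := by
          simp; omega
        rw [this, Bool.true_or]
        simp
      · have ho0 : o = 0 := by omega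
        subst ho0
        simp only [show ((0:Int) + 1 == 2) = false by decide, Bool.false_or]
        norm_num
        rw [ih rest 1 (fun x hx => hfree x (by simp [hx])) (by omega) (by omega)]
        rw [add_comm (1:Int)]
    · simp only [show (v == 1) = false by simpa using h1v, Bool.false_eq_true, if_false]
      rw [ih rest o (fun x hx => hfree x (by simp [hx])) h0 h1]
      simp

lemma idx_len (vs : List Int) : ∀ (s : Int),
    ((PySem.List.enumerate vs s).filterMap (fun p => if p.2 == 2 then some p.1 else none)).length
      = vs.count 2 := by
  induction vs with
  | nil => intro s; simp [PySem.List.enumerate_nil]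
  | cons v rest ih =>
    intro s
    rw [PySem.List.enumerate_cons, List.filterMap_cons]
    by_cases h : v == 2 <;> simp_all

lemma idx_shift (vs : List Int) : ∀ (s t : Int),
    (PySem.List.enumerate vs (s + t)).filterMap (fun p => if p.2 == 2 then some p.1 else none)
      = ((PySem.List.enumerate vs s).filterMap (fun p => if p.2 == 2 then some p.1 else none)).map (· + t) := by
  induction vs with
  | nil => intro s t; simp [PySem.List.enumerate_nil]
  | cons v rest ih =>
    intro s t
    rw [PySem.List.enumerate_cons, PySem.List.enumerate_cons, List.filterMap_cons, List.filterMap_cons]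
    have : s + t + 1 = (s + 1) + t := by ring
    rw [this, ih (s+1) t]
    by_cases h : v == 2 <;> simp [h]

lemma idx_nonneg (vs : List Int) : ∀ (s x : Int),
    x ∈ (PySem.List.enumerate vs s).filterMap (fun p => if p.2 == 2 then some p.1 else none) → s ≤ x := by
  induction vs with
  | nil => intro s x h; simp [PySem.List.enumerate_nil] at h
  | cons v rest ih =>
    intro s x h
    rw [PySem.List.enumerate_cons, List.filterMap_cons] at h
    by_cases h2 : v == 2
    · simp only [h2, if_true] at h
      rcases List.mem_cons.mp h with h | h
      · omega
      · have := ih (s+1) x h; omega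
    · simp only [h2, Bool.false_eq_true, if_false] at h
      have := ih (s+1) x h; omega

lemma idx_no2 (vs : List Int) (s : Int) (h : ∀ x ∈ vs, x ≠ 2) :
    (PySem.List.enumerate vs s).filterMap (fun p => if p.2 == 2 then some p.1 else none) = [] := by
  have := idx_len vs s
  rw [List.count_eq_zero.mpr (fun hc => h 2 hc rfl)] at this
  exact List.length_eq_zero_iff.mp this

lemma idx_split (pre rest : List Int) (h : ∀ x ∈ pre, x ≠ 2) :
    (PySem.List.enumerate (pre ++ 2 :: rest) 0).filterMap (fun p => if p.2 == 2 then some p.1 else none)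
      = (pre.length : Int) ::
        ((PySem.List.enumerate rest 0).filterMap (fun p => if p.2 == 2 then some p.1 else none)).map
          (· + ((pre.length : Int) + 1)) := by
  rw [PySem.List.enumerate_append, List.filterMap_append, idx_no2 pre 0 h,
      PySem.List.enumerate_cons, List.filterMap_cons]
  simp only [show ((2:Int) == 2) = true from rfl, if_true]
  have : (0:Int) + pre.length + 1 = 0 + ((pre.length : Int) + 1) := by ring
  rw [this, idx_shift rest 0 ((pre.length : Int) + 1)]
  simp

lemma slice_shift (pre rest : List Int) (a b : Int) (ha : 0 ≤ a) (hb : 0 ≤ b) :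
    PySem.List.slice (pre ++ 2 :: rest) (some (a + ((pre.length : Int) + 1))) (some (b + ((pre.length : Int) + 1)))
      = PySem.List.slice rest (some a) (some b) := by
  rw [PySem.List.slice_toNat _ (by omega) (by omega), PySem.List.slice_toNat _ ha hb]
  have h1 : (a + ((pre.length:Int)+1)).toNat = pre.length + (1 + a.toNat) := by omega
  have h2 : (b + ((pre.length:Int)+1)).toNat - (pre.length + (1 + a.toNat)) = b.toNat - a.toNat := by omega
  rw [h1, h2]
  congr 1
  rw [List.drop_append]
  rw [show 1 + a.toNat = a.toNat + 1 by omega]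
  simp [List.drop_eq_nil_of_le]

lemma cnt_first (pre rest : List Int) (m : Int) (hm : 0 ≤ m) :
    (PySem.List.slice (pre ++ 2 :: rest) (some (pre.length : Int)) (some ((m + ((pre.length:Int)+1)) + 1))).count 1
      = (PySem.List.slice rest (some 0) (some (m + 1))).count 1 := by
  rw [PySem.List.slice_toNat _ (by omega) (by omega), PySem.List.slice_toNat _ (by omega) (by omega)]
  have h1 : ((pre.length : Int)).toNat = pre.length := by omega
  have h2 : (m + ((pre.length:Int)+1) + 1).toNat - pre.length = m.toNat + 2 := by omega
  have h3 : (m + 1).toNat - Int.toNat 0 = m.toNat + 1 := by omega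
  rw [h1, h2, h3]
  have h4 : List.drop pre.length (pre ++ 2 :: rest) = 2 :: rest := List.drop_left
  rw [h4]
  simp

lemma cnt_pre (pre rest : List Int) :
    (PySem.List.slice (pre ++ 2 :: rest) (some 0) (some ((pre.length:Int)+1))).count 1 = pre.count 1 := by
  rw [PySem.List.slice_toNat _ (by omega) (by omega)]
  have h2 : ((pre.length:Int)+1).toNat - Int.toNat 0 = pre.length + 1 := by omega
  have h3 : Int.toNat 0 = 0 := by omega
  rw [h2, h3]
  simp only [List.drop_zero]
  rw [List.take_append]
  simp [List.count_append, List.take_of_length_le (by omega : pre.length ≤ pre.length + 1)]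

lemma loop_shift (pre rest : List Int) : ∀ (M : List Int), (∀ x ∈ M, 0 ≤ x) →
    checkWithTreesLoop (pre ++ 2 :: rest) (M.map (· + ((pre.length:Int)+1))) = checkWithTreesLoop rest M := by
  intro M
  induction M with
  | nil => intro _; simp [checkWithTreesLoop]
  | cons a M0 ih =>
    intro hM
    cases M0 with
    | nil => simp [checkWithTreesLoop]
    | cons b M' =>
      simp only [List.map_cons]
      rw [show checkWithTreesLoop (pre ++ 2 :: rest)
            ((a + ((pre.length:Int)+1)) :: (b + ((pre.length:Int)+1)) :: (M'.map (· + ((pre.length:Int)+1))))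
          = if (PySem.List.slice (pre ++ 2 :: rest) (some (a + ((pre.length:Int)+1)))
                (some ((b + ((pre.length:Int)+1)) + 1))).count 1 > 1 then some true
            else checkWithTreesLoop (pre ++ 2 :: rest) ((b + ((pre.length:Int)+1)) :: (M'.map (· + ((pre.length:Int)+1))))
          from rfl]
      rw [show checkWithTreesLoop rest (a :: b :: M')
          = if (PySem.List.slice rest (some a) (some (b + 1))).count 1 > 1 then some true
            else checkWithTreesLoop rest (b :: M') from rfl]
      have hb1 : (b + ((pre.length:Int)+1)) + 1 = (b + 1) + ((pre.length:Int)+1) := by ring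
      rw [hb1, slice_shift pre rest a (b+1) (hM a (by simp)) (by have := hM b (by simp); omega)]
      have := ih (fun x hx => hM x (by simp [hx]))
      simp only [List.map_cons] at this
      rw [this]

lemma split2 (vs : List Int) :
    (∀ x ∈ vs, x ≠ 2) ∨ ∃ pre rest, vs = pre ++ 2 :: rest ∧ ∀ x ∈ pre, x ≠ 2 := by
  induction vs with
  | nil => left; simp
  | cons v vs ih =>
    by_cases hv : v = 2
    · right; exact ⟨[], vs, by simp [hv], by simp⟩
    · rcases ih with h | ⟨pre, rest, heq, hfree⟩
      · left
        intro x hx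
        rcases List.mem_cons.mp hx with h' | h'
        · simpa [h'] using hv
        · exact h x h'
      · right
        refine ⟨v :: pre, rest, by simp [heq], ?_⟩
        intro x hx
        rcases List.mem_cons.mp hx with h' | h'
        · simpa [h'] using hv
        · exact hfree x h'

lemma Achar : ∀ (n : Nat) (values : List Int), values.length = n →
    checkWithTreesLoop values
      (0 :: (((PySem.List.enumerate values 0).filterMap (fun p => if p.2 == 2 then some p.1 else none))
        ++ [(values.length : Int) - 1]))
      = if badFrom values 0 then some true else none := by
  intro n
  induction n using Nat.strong_induction_on with
  | _ n ih =>
    intro values hlen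
    rcases split2 values with hfree | ⟨pre, rest, heq, hfree⟩
    · -- no 2 anywhere: one slice, the whole list
      rw [idx_no2 values 0 hfree]
      simp only [List.nil_append]
      rw [show checkWithTreesLoop values (0 :: [(values.length : Int) - 1])
          = if (PySem.List.slice values (some 0) (some (((values.length : Int) - 1) + 1))).count 1 > 1
            then some true else checkWithTreesLoop values [(values.length : Int) - 1] from rfl]
      rw [show ((values.length : Int) - 1) + 1 = ((values.length : Nat) : Int) by ring]
      rw [PySem.List.slice_zero_start, PySem.List.slice_to_natCast]
      simp only [List.take_length]
      rw [badFrom_no2 values 0 hfree (by omega) (by omega)]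
      rw [show checkWithTreesLoop values [(values.length : Int) - 1] = none from rfl]
      by_cases hc : values.count 1 > 1
      · rw [if_pos hc, if_pos (by simp; omega)]
      · rw [if_neg hc, if_neg (by simp; omega)]
    · subst heq
      rw [idx_split pre rest hfree]
      have hn : ((pre ++ 2 :: rest).length : Int) - 1
          = ((rest.length : Int) - 1) + ((pre.length : Int) + 1) := by
        push_cast [List.length_append, List.length_cons]; ring
      rw [hn]
      rw [badFrom_split pre rest 0 hfree (by omega) (by omega)]
      rw [show checkWithTreesLoop (pre ++ 2 :: rest)
            (0 :: (((pre.length : Int) :: (((PySem.List.enumerate rest 0).filterMap (fun p => if p.2 == 2 then some p.1 else none)).map (· + ((pre.length : Int) + 1))))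
              ++ [((rest.length : Int) - 1) + ((pre.length : Int) + 1)]))
          = if (PySem.List.slice (pre ++ 2 :: rest) (some 0) (some ((pre.length : Int) + 1))).count 1 > 1 then some true
            else checkWithTreesLoop (pre ++ 2 :: rest)
              ((pre.length : Int) :: (((PySem.List.enumerate rest 0).filterMap (fun p => if p.2 == 2 then some p.1 else none)).map (· + ((pre.length : Int) + 1))
                ++ [((rest.length : Int) - 1) + ((pre.length : Int) + 1)])) from rfl]
      rw [cnt_pre pre rest]
      by_cases hcp : pre.count 1 > 1
      · have hd : decide (2 ≤ (0:Int) + (pre.count 1 : Int)) = true := by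
          simp; omega
        rw [if_pos hcp, hd, Bool.true_or, if_pos rfl]
      · have hd : decide (2 ≤ (0:Int) + (pre.count 1 : Int)) = false := by
          simp; omega
        rw [if_neg hcp, hd, Bool.false_or]
        have hih := ih rest.length (by rw [← hlen]; simp [List.length_append]; omega) rest rfl
        by_cases hrest : rest = []
        · -- rest = []: the remaining pair is (pre.length, pre.length); its slice is [2]
          subst hrest
          simp only [PySem.List.enumerate_nil, List.filterMap_nil, List.map_nil, List.nil_append,
            List.length_nil, Nat.cast_zero]
          rw [show ((0:Int) - 1) + ((pre.length : Int) + 1) = (pre.length : Int) by ring]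
          rw [show checkWithTreesLoop (pre ++ 2 :: []) [(pre.length : Int), (pre.length : Int)]
              = if (PySem.List.slice (pre ++ 2 :: []) (some (pre.length : Int)) (some ((pre.length : Int) + 1))).count 1 > 1
                then some true else checkWithTreesLoop (pre ++ 2 :: []) [(pre.length : Int)] from rfl]
          rw [PySem.List.slice_toNat _ (by omega) (by omega)]
          have h1 : ((pre.length : Int)).toNat = pre.length := by omega
          rw [h1]
          rw [show ((pre.length : Int) + 1).toNat - pre.length = 1 by omega]
          rw [List.drop_left]
          simp [checkWithTreesLoop, badFrom]
        · rcases hM : ((PySem.List.enumerate rest 0).filterMap (fun p => if p.2 == 2 then some p.1 else none))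
              ++ [(rest.length : Int) - 1] with _ | ⟨m0, M'⟩
          · exact absurd hM (by simp)
          · have hmem : ∀ x ∈ m0 :: M', 0 ≤ x := by
              intro x hx
              rw [← hM] at hx
              rcases List.mem_append.mp hx with h' | h'
              · exact idx_nonneg rest 0 x h'
              · have : x = (rest.length : Int) - 1 := by simpa using h'
                have : 0 < rest.length := List.length_pos_of_ne_nil hrest
                omega
            have hstep : ((PySem.List.enumerate rest 0).filterMap (fun p => if p.2 == 2 then some p.1 else none)).map (· + ((pre.length : Int) + 1))
                ++ [((rest.length : Int) - 1) + ((pre.length : Int) + 1)]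
                = (m0 :: M').map (· + ((pre.length : Int) + 1)) := by
              rw [← hM]; simp
            rw [hstep]
            simp only [List.map_cons]
            rw [show checkWithTreesLoop (pre ++ 2 :: rest)
                  ((pre.length : Int) :: (m0 + ((pre.length : Int) + 1)) :: M'.map (· + ((pre.length : Int) + 1)))
                = if (PySem.List.slice (pre ++ 2 :: rest) (some (pre.length : Int)) (some ((m0 + ((pre.length : Int) + 1)) + 1))).count 1 > 1
                  then some true
                  else checkWithTreesLoop (pre ++ 2 :: rest) ((m0 + ((pre.length : Int) + 1)) :: M'.map (· + ((pre.length : Int) + 1))) from rfl]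
            rw [cnt_first pre rest m0 (hmem m0 (by simp))]
            have htail := loop_shift pre rest (m0 :: M') hmem
            simp only [List.map_cons] at htail
            rw [htail]
            rw [show (if (PySem.List.slice rest (some 0) (some (m0 + 1))).count 1 > 1 then some true
                  else checkWithTreesLoop rest (m0 :: M'))
                = checkWithTreesLoop rest (0 :: m0 :: M') from rfl]
            rw [← hM]
            exact hih

-- ===== VERDICT (by name: the statement is the Claim_ definition above) =====
theorem checkWithTrees_spec : Claim_equal_checkWithTrees := by
  unfold Claim_equal_checkWithTrees
  intro values count _
  unfold Spec_checkWithTrees checkWithTrees checkWithTrees_alt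
  rw [scan_eq values 0 0]
  simp only [PySem.List.insert_zero, idx_len values 0, Achar values.length values rfl]
  by_cases hb : badFrom values 0 <;> by_cases hc : count > (values.count 2 : Int) + 1 <;>
    simp [hb, hc]
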